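-- pv_equiv track=rewrite | github.com/Asrar-Ahammad/CompetitiveProgramming | competitive_coding/medain_of_subarrays.py | countSubarray
-- ===== SOURCE A (Python) =====
-- def countSubarray(N, A, M):
--     count = 0
--     i = 0
--     sub_array = []
--     median = 0
--     # A = sorted(A)
--     while i < N:
--         if A[i] == M:
--             count+=1
--         sub_array = A[i:N]
--         sub_array = sorted(sub_array)
--         size = len(sub_array)
--         if size%2 == 0:
--             median = sub_array[(size//2)-1]
--             if median == M:
--                 count+=1
--         else:
--             median = sub_array[size//2]
--             if median == M:
--                 count+=1
--         i+=1
--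
--     return count
-- ===== SOURCE B (Python) =====
-- def countSubarray(N, A, M):
--     # One right-to-left pass: the lower median of the suffix A[i:N] equals M
--     # iff less <= (s-1)//2 < less+eq, where less/eq count elements < M / == M.
--     count = 0
--     less = 0
--     eq = 0
--     for i in range(N - 1, -1, -1):
--         x = A[i]
--         if x < M:
--             less += 1
--         elif x == M:
--             eq += 1
--             count += 1          # the A[i] == M check
--         k = (N - i - 1) // 2
--         if less <= k < less + eq:
--             count += 1          # the median check
--     return count
-- ===== Notes on version B (the rewrite author's own statement) =====
-- stated objective: faster
-- what changed: Instead of sorting every suffix A[i:N] and reading off its lower median, B makes one right-to-left pass maintaining counts of elements < M and == M, using that the lower median equals M iff less <= (s-1)//2 < less+eq.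
import Mathlib
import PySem

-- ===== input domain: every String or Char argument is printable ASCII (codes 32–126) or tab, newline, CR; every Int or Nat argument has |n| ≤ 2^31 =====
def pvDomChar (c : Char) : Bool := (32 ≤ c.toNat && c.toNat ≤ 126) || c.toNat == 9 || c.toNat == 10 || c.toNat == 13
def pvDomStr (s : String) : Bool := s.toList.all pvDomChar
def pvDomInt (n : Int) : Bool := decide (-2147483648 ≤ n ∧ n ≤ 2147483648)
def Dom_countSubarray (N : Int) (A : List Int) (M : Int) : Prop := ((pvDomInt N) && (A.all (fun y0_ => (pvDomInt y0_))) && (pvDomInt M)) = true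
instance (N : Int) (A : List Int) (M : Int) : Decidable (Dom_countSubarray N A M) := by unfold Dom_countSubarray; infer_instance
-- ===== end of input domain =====

-- B replaces re-sorting every suffix (O(N^2 log N)) by one right-to-left pass with
-- <M / ==M counters characterising the lower median (O(N)); objective: faster.

-- ===== PORT A =====
-- while i < N: count A[i]==M; sort the suffix A[i:N]; count median==M; i+=1
def countSubarrayALoop (N : Int) (A : List Int) (M : Int) (i : Int) (count : Int) : Int :=
  if _h : i < N then
    let count := if PySem.List.pyGetD A i 0 = M then count + 1 else count
    let sub_array := PySem.List.slice A (some i) (some N)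
    let sub_array := PySem.List.sorted sub_array (fun x => x) false
    let size : Int := (sub_array.length : Int)
    let count :=
      if PySem.Int.mod size 2 = 0 then
        let median := PySem.List.pyGetD sub_array (PySem.Int.floordiv size 2 - 1) 0
        if median = M then count + 1 else count
      else
        let median := PySem.List.pyGetD sub_array (PySem.Int.floordiv size 2) 0
        if median = M then count + 1 else count
    countSubarrayALoop N A M (i + 1) count
  else count
termination_by (N - i).toNat
decreasing_by omega

def countSubarray (N : Int) (A : List Int) (M : Int) : Int :=
  countSubarrayALoop N A M 0 0

-- ===== PORT B =====
-- for i in range(N-1, -1, -1): maintain less = #{< M}, eq = #{== M} of A[i:N]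
def countSubarrayBLoop (A : List Int) (M : Int) (N : Int) (i count less eq : Int) : Int :=
  if _h : 0 ≤ i then
    let x := PySem.List.pyGetD A i 0
    let st :=
      if x < M then (count, less + 1, eq)
      else if x = M then (count + 1, less, eq + 1)
      else (count, less, eq)
    let count := st.1
    let less := st.2.1
    let eq := st.2.2
    let k := PySem.Int.floordiv (N - i - 1) 2
    let count := if less ≤ k ∧ k < less + eq then count + 1 else count
    countSubarrayBLoop A M N (i - 1) count less eq
  else count
termination_by (i + 1).toNat
decreasing_by omega

def countSubarray_alt (N : Int) (A : List Int) (M : Int) : Int :=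
  countSubarrayBLoop A M N (N - 1) 0 0 0

-- ===== PRECONDITION & SPEC =====
-- Pre_ excludes exactly the inputs where the Python A raises IndexError (A[i] with
-- i reaching len(A) while i < N), i.e. it requires N ≤ len(A).
def Pre_countSubarray (N : Int) (A : List Int) (M : Int) : Prop := N ≤ (A.length : Int)
instance (N : Int) (A : List Int) (M : Int) : Decidable (Pre_countSubarray N A M) := by
  unfold Pre_countSubarray; infer_instance

def pvWitness_countSubarray : Int × List Int × Int := (3, [2, 1, 2], 2)

def Spec_countSubarray (N : Int) (A : List Int) (M : Int) (out : Int) : Prop := out = countSubarray_alt N A M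
instance (N : Int) (A : List Int) (M : Int) (out : Int) : Decidable (Spec_countSubarray N A M out) := by unfold Spec_countSubarray; infer_instance

-- ===== CLAIM (what is proved, stated in full; the proofs are below) =====
def Claim_equal_countSubarray : Prop := ∀ (N : Int) (A : List Int) (M : Int), Dom_countSubarray N A M → Pre_countSubarray N A M → Spec_countSubarray N A M (countSubarray N A M)

-- ===== LEMMAS AND PROOFS =====

-- In a ≤-sorted list, a downward-closed predicate holds at index k iff k is below its count.
theorem pvSortedGetIff (p : Int → Prop) [DecidablePred p]
    (hmono : ∀ x y : Int, x ≤ y → p y → p x)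
    (l : List Int) (hl : l.Pairwise (· ≤ ·)) (k : Nat) (hk : k < l.length) :
    p l[k] ↔ k < l.countP (fun x => decide (p x)) := by
  induction l generalizing k with
  | nil => simp at hk
  | cons a t ih =>
    rcases List.pairwise_cons.mp hl with ⟨ha, ht⟩
    by_cases hpa : p a
    · cases k with
      | zero =>
        simp only [List.getElem_cons_zero, List.countP_cons, hpa, decide_true, if_true]
        constructor
        · intro _; omega
        · intro _; trivial
      | succ k =>
        have hk' : k < t.length := by simpa using hk
        have ih' := ih ht k hk'
        simp only [List.getElem_cons_succ, List.countP_cons, hpa, decide_true, if_true]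
        constructor
        · intro h; have := ih'.mp h; omega
        · intro h; exact ih'.mpr (by omega)
    · have hz : t.countP (fun x => decide (p x)) = 0 := by
        rw [List.countP_eq_zero]
        intro b hb
        simp only [decide_eq_true_eq]
        exact fun hpb => hpa (hmono a b (ha b hb) hpb)
      cases k with
      | zero => simp [hpa, hz]
      | succ k =>
        have hk' : k < t.length := by simpa using hk
        have hmem : t[k] ∈ t := List.getElem_mem hk'
        have hnp : ¬ p t[k] := fun hpb => hpa (hmono a t[k] (ha _ hmem) hpb)
        simp [hpa, hz, hnp]

theorem pvCountLe (l : List Int) (M : Int) :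
    l.countP (fun x => decide (x ≤ M)) =
      l.countP (fun x => decide (x < M)) + l.countP (fun x => decide (x = M)) := by
  induction l with
  | nil => simp
  | cons a t ih =>
    by_cases hlt : a < M
    · simp [List.countP_cons, hlt, le_of_lt hlt, ne_of_lt hlt, ih] <;> omega
    · by_cases heq : a = M
      · subst heq
        simp [List.countP_cons, lt_irrefl, ih] <;> omega
      · have hM : ¬ a ≤ M := by omega
        simp [List.countP_cons, hlt, heq, hM, ih]

-- element at index k of a ≤-sorted list equals M iff k lies in the M-band
theorem pvSortedEqIff (l : List Int) (M : Int) (hl : l.Pairwise (· ≤ ·))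
    (k : Nat) (hk : k < l.length) :
    l[k] = M ↔ (l.countP (fun x => decide (x < M)) ≤ k ∧
                 k < l.countP (fun x => decide (x < M)) + l.countP (fun x => decide (x = M))) := by
  have h1 := pvSortedGetIff (fun x => x < M) (fun x y hxy h => lt_of_le_of_lt hxy h) l hl k hk
  have h2 := pvSortedGetIff (fun x => x ≤ M) (fun x y hxy h => le_trans hxy h) l hl k hk
  rw [← pvCountLe]
  constructor
  · intro he
    have hle' : k < l.countP (fun x => decide (x ≤ M)) := h2.mp (le_of_eq he)
    have hnlt : ¬ k < l.countP (fun x => decide (x < M)) := by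
      intro h
      have hlt := h1.mpr h
      rw [he] at hlt
      exact lt_irrefl M hlt
    exact ⟨by omega, hle'⟩
  · intro ⟨hle, hlt⟩
    have h1' : ¬ l[k] < M := fun h => by have := h1.mp h; omega
    have h2' : l[k] ≤ M := h2.mpr hlt
    omega

-- the suffix A[i:N] and its counters
def pvSuf (N : Int) (A : List Int) (i : Int) : List Int := PySem.List.slice A (some i) (some N)
def pvLc (N : Int) (A : List Int) (M : Int) (i : Int) : Int :=
  ((pvSuf N A i).countP (fun x => decide (x < M)) : Int)
def pvEc (N : Int) (A : List Int) (M : Int) (i : Int) : Int :=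
  ((pvSuf N A i).countP (fun x => decide (x = M)) : Int)

-- per-index contribution, shared by both loops
def pvC (N : Int) (A : List Int) (M : Int) (i : Int) : Int :=
  (if PySem.List.pyGetD A i 0 = M then 1 else 0) +
  (if pvLc N A M i ≤ PySem.Int.floordiv (N - i - 1) 2 ∧
      PySem.Int.floordiv (N - i - 1) 2 < pvLc N A M i + pvEc N A M i then 1 else 0)

-- Σ_{j=i..N-1} pvC j
def pvCsum (N : Int) (A : List Int) (M : Int) (i : Int) : Int :=
  if _h : i < N then pvC N A M i + pvCsum N A M (i + 1) else 0
termination_by (N - i).toNat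
decreasing_by omega

theorem pvSliceCons (N : Int) (A : List Int) (i : Int) (h0 : 0 ≤ i) (hiN : i < N)
    (hlen : N ≤ (A.length : Int)) (hi : i.toNat < A.length) :
    PySem.List.slice A (some i) (some N) = A[i.toNat] :: PySem.List.slice A (some (i + 1)) (some N) := by
  rw [PySem.List.slice_toNat A h0 (by omega), PySem.List.slice_toNat A (by omega) (by omega)]
  rw [List.drop_eq_getElem_cons hi]
  rw [show N.toNat - i.toNat = (N.toNat - (i + 1).toNat) + 1 from by omega]
  rw [List.take_succ_cons]
  rw [show (i + 1).toNat = i.toNat + 1 from by omega]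

theorem pvSufLen (N : Int) (A : List Int) (i : Int) (h0 : 0 ≤ i) (hiN : i ≤ N)
    (hlen : N ≤ (A.length : Int)) :
    ((pvSuf N A i).length : Int) = N - i := by
  unfold pvSuf
  rw [PySem.List.slice_toNat A h0 (by omega)]
  simp [List.length_take, List.length_drop]
  omega

-- A's loop body at i contributes exactly pvC i
theorem pvAStep (N : Int) (A : List Int) (M : Int) (i count : Int)
    (h0 : 0 ≤ i) (hiN : i < N) (hlen : N ≤ (A.length : Int)) :
    countSubarrayALoop N A M i count = countSubarrayALoop N A M (i + 1) (count + pvC N A M i) := by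
  rw [countSubarrayALoop, dif_pos hiN]
  simp only []
  have hsp := PySem.List.sorted_perm (PySem.List.slice A (some i) (some N)) (fun x : Int => x) false
  set S := PySem.List.sorted (PySem.List.slice A (some i) (some N)) (fun x : Int => x) false with hS
  have hlen1 : ((PySem.List.slice A (some i) (some N)).length : Int) = N - i :=
    pvSufLen N A i h0 (le_of_lt hiN) hlen
  have hlenSI : ((S.length : Nat) : Int) = N - i := by rw [hsp.length_eq]; exact hlen1
  have hpw : S.Pairwise (· ≤ ·) := by
    simpa using PySem.List.sorted_pairwise (PySem.List.slice A (some i) (some N)) (fun x : Int => x)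
  have he : PySem.Int.mod ((S.length : Nat) : Int) 2 = (N - i) % 2 := by
    rw [PySem.Int.mod_eq_emod_of_pos (by omega), hlenSI]
  have hd : PySem.Int.floordiv ((S.length : Nat) : Int) 2 = (N - i) / 2 := by
    rw [PySem.Int.floordiv_eq_ediv_of_pos (by omega), hlenSI]
  have hd1 : PySem.Int.floordiv (N - i - 1) 2 = (N - i - 1) / 2 := by
    rw [PySem.Int.floordiv_eq_ediv_of_pos (by omega)]
  have hLc : pvLc N A M i = ((S.countP (fun x => decide (x < M)) : Nat) : Int) := by
    unfold pvLc pvSuf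
    rw [hsp.countP_eq]
  have hEc : pvEc N A M i = ((S.countP (fun x => decide (x = M)) : Nat) : Int) := by
    unfold pvEc pvSuf
    rw [hsp.countP_eq]
  have hmed : ∀ j : Int, 0 ≤ j → j < N - i →
      (PySem.List.pyGetD S j 0 = M ↔
        (pvLc N A M i ≤ j ∧ j < pvLc N A M i + pvEc N A M i)) := by
    intro j hj0 hjlt
    have hjlen : j.toNat < S.length := by omega
    rw [PySem.List.pyGetD_eq_getElem S 0 hj0 (by omega)]
    rw [pvSortedEqIff S M hpw j.toNat hjlen]
    rw [hLc, hEc]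
    omega
  have hidx : (N - i) % 2 = 0 → (N - i) / 2 - 1 = (N - i - 1) / 2 := by omega
  have hidx' : ¬ (N - i) % 2 = 0 → (N - i) / 2 = (N - i - 1) / 2 := by omega
  simp only [he, hd]
  by_cases hpar : (N - i) % 2 = 0
  · rw [if_pos hpar, hidx hpar]
    rw [show countSubarrayALoop N A M (i + 1)
          (if PySem.List.pyGetD S ((N - i - 1) / 2) 0 = M then
            (if PySem.List.pyGetD A i 0 = M then count + 1 else count) + 1
          else (if PySem.List.pyGetD A i 0 = M then count + 1 else count)) =
        countSubarrayALoop N A M (i + 1) (count + pvC N A M i) from ?_]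
    congr 1
    rw [pvC, hd1]
    have := hmed ((N - i - 1) / 2) (by omega) (by omega)
    split_ifs with h1 h2 h2 <;> first
      | omega
      | (exact absurd (this.mp h1) h2)
      | (exact absurd (this.mpr h2) h1)
  · rw [if_neg hpar, hidx' hpar]
    congr 1
    rw [pvC, hd1]
    have := hmed ((N - i - 1) / 2) (by omega) (by omega)
    split_ifs with h1 h2 h2 <;> first
      | omega
      | (exact absurd (this.mp h1) h2)
      | (exact absurd (this.mpr h2) h1)

theorem pvALoopSum (N : Int) (A : List Int) (M : Int) (i count : Int)
    (h0 : 0 ≤ i) (hlen : N ≤ (A.length : Int)) :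
    countSubarrayALoop N A M i count = count + pvCsum N A M i := by
  by_cases h : i < N
  · have hcs : pvCsum N A M i = pvC N A M i + pvCsum N A M (i + 1) := by
      conv_lhs => rw [pvCsum]
      rw [dif_pos h]
    rw [pvAStep N A M i count h0 h hlen,
      pvALoopSum N A M (i + 1) (count + pvC N A M i) (by omega) hlen, hcs]
    ring
  · rw [countSubarrayALoop, dif_neg h, pvCsum, dif_neg h]
    ring
termination_by (N - i).toNat
decreasing_by omega

-- counter recurrences: adding A[i] in front of the suffix
theorem pvLcCons (N : Int) (A : List Int) (M : Int) (i : Int)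
    (h0 : 0 ≤ i) (hiN : i < N) (hlen : N ≤ (A.length : Int)) :
    pvLc N A M i = pvLc N A M (i + 1) + (if A[i.toNat]'(by omega) < M then 1 else 0) ∧
    pvEc N A M i = pvEc N A M (i + 1) + (if A[i.toNat]'(by omega) = M then 1 else 0) := by
  have hi : i.toNat < A.length := by omega
  unfold pvLc pvEc pvSuf
  rw [pvSliceCons N A i h0 hiN hlen hi]
  constructor
  · rw [List.countP_cons]
    by_cases hh : A[i.toNat]'hi < M
    · simp [hh]
    · simp [hh]
  · rw [List.countP_cons]
    by_cases hh : A[i.toNat]'hi = M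
    · simp [hh]
    · simp [hh]

theorem pvBStep (N : Int) (A : List Int) (M : Int) (i count : Int)
    (h0 : 0 ≤ i) (hiN : i < N) (hlen : N ≤ (A.length : Int)) :
    countSubarrayBLoop A M N i count (pvLc N A M (i + 1)) (pvEc N A M (i + 1)) =
      countSubarrayBLoop A M N (i - 1) (count + pvC N A M i) (pvLc N A M i) (pvEc N A M i) := by
  have hi : i.toNat < A.length := by omega
  rcases pvLcCons N A M i h0 hiN hlen with ⟨hLc, hEc⟩
  have hx : PySem.List.pyGetD A i 0 = A[i.toNat]'hi := PySem.List.pyGetD_eq_getElem A 0 h0 (by omega)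
  rw [countSubarrayBLoop, dif_pos h0]
  simp only [hx]
  rw [pvC, hx]
  by_cases h1 : A[i.toNat]'hi < M
  · have hne : ¬ A[i.toNat]'hi = M := by omega
    simp only [if_pos h1, if_neg hne]
    congr 1 <;> [skip; omega; omega]
    split_ifs with ha hb hb <;> omega
  · by_cases h2 : A[i.toNat]'hi = M
    · simp only [if_neg h1, if_pos h2]
      congr 1 <;> [skip; omega; omega]
      split_ifs with ha hb hb <;> omega
    · simp only [if_neg h1, if_neg h2]
      congr 1 <;> [skip; omega; omega]
      split_ifs with ha hb hb <;> omega

theorem pvBLoopSum (N : Int) (A : List Int) (M : Int) (i count : Int)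
    (hm1 : -1 ≤ i) (hiN : i < N) (hlen : N ≤ (A.length : Int)) :
    countSubarrayBLoop A M N i count (pvLc N A M (i + 1)) (pvEc N A M (i + 1)) =
      count + (pvCsum N A M 0 - pvCsum N A M (i + 1)) := by
  by_cases h : 0 ≤ i
  · rw [pvBStep N A M i count h hiN hlen]
    have hrec := pvBLoopSum N A M (i - 1) (count + pvC N A M i) (by omega) (by omega) hlen
    rw [show i - 1 + 1 = i from by ring] at hrec
    rw [hrec]
    have hcs : pvCsum N A M i = pvC N A M i + pvCsum N A M (i + 1) := by
      conv_lhs => rw [pvCsum]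
      rw [dif_pos hiN]
    rw [hcs]
    ring
  · rw [countSubarrayBLoop, dif_neg h]
    rw [show i + 1 = 0 from by omega]
    ring
termination_by (i + 1).toNat
decreasing_by omega

theorem pvSufNil (N : Int) (A : List Int) (M : Int) (hN : 0 ≤ N) :
    pvLc N A M N = 0 ∧ pvEc N A M N = 0 := by
  unfold pvLc pvEc pvSuf
  rw [PySem.List.slice_toNat A hN hN]
  simp

-- ===== VERDICT (by name: the statement is the Claim_ definition above) =====
theorem countSubarray_spec : Claim_equal_countSubarray := by
  intro N A M _dom hpre
  unfold Spec_countSubarray countSubarray countSubarray_alt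
  by_cases hN : 0 < N
  · rcases pvSufNil N A M (by omega) with ⟨hLcN, hEcN⟩
    have hA := pvALoopSum N A M 0 0 le_rfl hpre
    have hB := pvBLoopSum N A M (N - 1) 0 (by omega) (by omega) hpre
    rw [show N - 1 + 1 = N from by ring] at hB
    rw [hLcN, hEcN] at hB
    rw [hA, hB]
    rw [show pvCsum N A M N = 0 from by rw [pvCsum, dif_neg (lt_irrefl N)]]
    ring
  · rw [countSubarrayALoop, dif_neg (by omega), countSubarrayBLoop, dif_neg (by omega)]
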